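-- pv_equiv track=rewrite | github.com/dnakamuraz/prepDyn | src/prepDyn_auxiliary.py | replace_terminal_gaps_dict
-- ===== SOURCE A (Python) =====
-- def replace_terminal_gaps_dict(alignment):
--     """
--     Replaces terminal gaps ('-') with '?' in a sequence alignment stored as a dictionary,
--     while keeping internal gaps as '-'.
--
--     Parameters:
--         alignment (dict): Dictionary with sequence names as keys and sequences as values.
--
--     Returns:
--         dict: Modified alignment with terminal gaps replaced by '?'.
--     """
--     # Rename 'modified_alignment' to 'alignment'
--     for name, sequence in alignment.items():
--         # Find the first and last non-gap characters
--         first_non_gap = next((i for i, char in enumerate(sequence) if char != "-"), None)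
--         last_non_gap = next((i for i, char in enumerate(reversed(sequence), 1) if char != "-"), None)
--
--         if first_non_gap is not None and last_non_gap is not None:
--             last_non_gap = len(sequence) - last_non_gap  # Adjust reversed index
--
--             # Replace terminal gaps with '?' and keep internal gaps as '-'
--             new_sequence = (
--                 "?" * first_non_gap +
--                 sequence[first_non_gap:last_non_gap + 1] +
--                 "?" * (len(sequence) - last_non_gap - 1)
--             )
--             alignment[name] = new_sequence
--         else:
--             # Handle sequences with only gaps
--             alignment[name] = "?" * len(sequence)
--
--     return alignment
-- ===== SOURCE B (Python) =====
-- def replace_terminal_gaps_dict(alignment):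
--     """Replace terminal gaps ('-') with '?', keeping internal gaps; mutates and returns the dict.
--
--     Single left-to-right pass per sequence: buffer each run of '-'s and flush it as
--     '?'s if no residue has been seen yet (leading gaps), as '-'s otherwise (internal
--     gaps); the run still pending at the end is the trailing gap run and flushes as '?'s.
--     """
--     for name, s in alignment.items():
--         out = []
--         run = 0
--         seen = False
--         for ch in s:
--             if ch == '-':
--                 run += 1
--             else:
--                 out.append(('-' if seen else '?') * run)
--                 out.append(ch)
--                 run = 0
--                 seen = True
--         out.append('?' * run)
--         alignment[name] = ''.join(out)
--     return alignment
-- ===== Notes on version B (the rewrite author's own statement) =====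
-- stated objective: alternative
-- what changed: A locates the first and last non-gap indices with two directional scans and rebuilds the string from slices and '?' padding; B never computes any index: it makes one left-to-right pass per sequence with a run-length buffer and a seen flag, flushing each gap run as '?' (terminal) or '-' (internal) as it goes.
import Mathlib
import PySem

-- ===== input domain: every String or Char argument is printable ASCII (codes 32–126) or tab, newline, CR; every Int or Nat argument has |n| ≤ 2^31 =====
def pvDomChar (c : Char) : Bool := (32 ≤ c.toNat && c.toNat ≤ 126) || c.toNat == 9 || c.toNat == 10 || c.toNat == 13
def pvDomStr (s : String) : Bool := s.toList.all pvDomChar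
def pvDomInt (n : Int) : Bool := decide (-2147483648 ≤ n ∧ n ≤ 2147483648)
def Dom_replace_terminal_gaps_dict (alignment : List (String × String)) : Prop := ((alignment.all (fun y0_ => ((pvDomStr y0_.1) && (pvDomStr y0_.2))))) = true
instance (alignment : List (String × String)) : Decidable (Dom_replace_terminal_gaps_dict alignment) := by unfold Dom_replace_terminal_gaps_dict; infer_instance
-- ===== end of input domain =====

-- B replaces A's two directional index scans + slicing with a single left-to-right pass per
-- sequence that buffers gap runs and flushes them as '?' (leading) or '-' (internal), trailing
-- run as '?' (alternative decomposition, same O(n) cost).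
-- Both A and B mutate the dict in place in Python; the equivalence proved is about the return value.

-- ===== PORT A =====
-- next((i for i, char in enumerate(seq, start) if char != "-"), None): first-match scan
def pvFirstNonGap : Nat → List Char → Option Nat
  | _, [] => none
  | i, c :: cs => if c ≠ '-' then some i else pvFirstNonGap (i + 1) cs

def pvASeq (s : List Char) : List Char :=
  let n := s.length
  match pvFirstNonGap 0 s, pvFirstNonGap 1 s.reverse with
  | some first, some lastRev =>
      -- last_non_gap = len(sequence) - last_non_gap  (all quantities nonnegative here)
      let lastIdx := n - lastRev
      List.replicate first '?'
        ++ PySem.List.slice s (some (first : Int)) (some ((lastIdx + 1 : Nat) : Int))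
        ++ List.replicate (n - lastIdx - 1) '?'
  | _, _ => List.replicate n '?'

def replace_terminal_gaps_dict (alignment : List (String × String)) : List (String × String) :=
  alignment.map (fun p => (p.1, String.ofList (pvASeq p.2.toList)))

-- ===== PORT B =====
-- the loop body of Source B: buffer '-' runs; flush as '?' before the first residue, as '-' after
def pvBStep (st : List Char × Nat × Bool) (ch : Char) : List Char × Nat × Bool :=
  let (out, run, seen) := st
  if ch == '-' then (out, run + 1, seen)
  else (out ++ List.replicate run (if seen then '-' else '?') ++ [ch], 0, true)

def pvBSeq (s : List Char) : List Char :=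
  let (out, run, _) := s.foldl pvBStep ([], 0, false)
  out ++ List.replicate run '?'   -- out.append('?' * run)

def replace_terminal_gaps_dict_alt (alignment : List (String × String)) : List (String × String) :=
  alignment.map (fun p => (p.1, String.ofList (pvBSeq p.2.toList)))

-- ===== PRECONDITION & SPEC =====
def Spec_replace_terminal_gaps_dict (alignment : List (String × String)) (out : List (String × String)) : Prop := out = replace_terminal_gaps_dict_alt alignment
instance (alignment : List (String × String)) (out : List (String × String)) : Decidable (Spec_replace_terminal_gaps_dict alignment out) := by unfold Spec_replace_terminal_gaps_dict; infer_instance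

-- ===== CLAIM (what is proved, stated in full; the proofs are below) =====
def Claim_equal_replace_terminal_gaps_dict : Prop := ∀ (alignment : List (String × String)), Dom_replace_terminal_gaps_dict alignment → Spec_replace_terminal_gaps_dict alignment (replace_terminal_gaps_dict alignment)

-- ===== LEMMAS AND PROOFS =====

-- canonical "strip" form both ports are reduced to (proof helper only)
def pvRstrip (m : List Char) : List Char := (m.reverse.dropWhile (· == '-')).reverse

def pvStrip (s : List Char) : List Char :=
  let t := s.dropWhile (· == '-')
  let u := pvRstrip t
  List.replicate (s.length - t.length) '?' ++ u ++ List.replicate (t.length - u.length) '?'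

theorem pvFirstNonGap_gaps_append (xs ys : List Char) (i : Nat)
    (h : ∀ c ∈ xs, c = '-') :
    pvFirstNonGap i (xs ++ ys) = pvFirstNonGap (i + xs.length) ys := by
  induction xs generalizing i with
  | nil => simp
  | cons c cs ih =>
      have hc : c = '-' := h c (by simp)
      simp only [List.cons_append, pvFirstNonGap, hc]
      have harg : i + 1 + cs.length = i + (c :: cs).length := by
        simp only [List.length_cons]
        omega
      rw [ih (i + 1) (fun d hd => h d (by simp [hd])), harg]
      simp

theorem pvFirstNonGap_gaps (xs : List Char) (i : Nat) (h : ∀ c ∈ xs, c = '-') :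
    pvFirstNonGap i xs = none := by
  have := pvFirstNonGap_gaps_append xs [] i h
  simpa using this

theorem pvFirstNonGap_cons_ne (c : Char) (cs : List Char) (i : Nat) (hc : c ≠ '-') :
    pvFirstNonGap i (c :: cs) = some i := by
  simp [pvFirstNonGap, hc]

theorem pvA_eq_strip (s : List Char) : pvASeq s = pvStrip s := by
  have hsplit : s.takeWhile (fun c => c == '-') ++ s.dropWhile (fun c => c == '-') = s :=
    List.takeWhile_append_dropWhile
  have hA1gap : ∀ c ∈ s.takeWhile (fun c => c == '-'), c = '-' := by
    intro c hc
    simpa using List.mem_takeWhile_imp hc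
  rcases hdw : s.dropWhile (fun c => c == '-') with _ | ⟨c, t'⟩
  · -- all-gap (or empty) sequence
    rw [hdw] at hsplit
    have hallgap : ∀ c ∈ s, c = '-' := by
      intro c hc
      rw [← hsplit] at hc
      simpa using hA1gap c (by simpa using hc)
    have h1 : pvFirstNonGap 0 s = none := pvFirstNonGap_gaps s 0 hallgap
    have h2 : pvFirstNonGap 1 s.reverse = none :=
      pvFirstNonGap_gaps s.reverse 1 (by intro c hc; exact hallgap c (List.mem_reverse.mp hc))
    simp [pvASeq, pvStrip, pvRstrip, h1, h2, hdw]
  · rw [hdw] at hsplit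
    have hcne : c ≠ '-' := by
      have := List.head?_dropWhile_not (fun c => c == '-') s
      rw [hdw] at this
      simpa using this
    have hsplit2 : (c :: t').reverse.takeWhile (fun c => c == '-') ++
        (c :: t').reverse.dropWhile (fun c => c == '-') = (c :: t').reverse :=
      List.takeWhile_append_dropWhile
    have hRgap : ∀ x ∈ (c :: t').reverse.takeWhile (fun c => c == '-'), x = '-' := by
      intro x hx
      simpa using List.mem_takeWhile_imp hx
    rcases hv : (c :: t').reverse.dropWhile (fun c => c == '-') with _ | ⟨d, v'⟩
    · exfalso
      rw [hv, List.append_nil] at hsplit2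
      exact hcne (hRgap c (by rw [hsplit2]; simp))
    · rw [hv] at hsplit2
      have hdne : d ≠ '-' := by
        have := List.head?_dropWhile_not (fun c => c == '-') (c :: t').reverse
        rw [hv] at this
        simpa using this
      set A1 := s.takeWhile (fun c => c == '-') with hA1def
      set R := (c :: t').reverse.takeWhile (fun c => c == '-') with hRdef
      have htdecomp : c :: t' = (d :: v').reverse ++ R.reverse := by
        conv_lhs => rw [← List.reverse_reverse (c :: t'), ← hsplit2, List.reverse_append]
      have hsdecomp : s = A1 ++ ((d :: v').reverse ++ R.reverse) := by
        conv_lhs => rw [← hsplit, htdecomp]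
      have h1 : pvFirstNonGap 0 s = some A1.length := by
        conv_lhs => rw [← hsplit]
        rw [pvFirstNonGap_gaps_append _ _ 0 hA1gap,
            pvFirstNonGap_cons_ne c t' _ hcne]
        simp
      have hrev : s.reverse = R ++ ((d :: v') ++ A1.reverse) := by
        conv_lhs => rw [← hsplit, List.reverse_append, ← hsplit2, List.append_assoc]
      have h2 : pvFirstNonGap 1 s.reverse = some (1 + R.length) := by
        rw [hrev, pvFirstNonGap_gaps_append _ _ 1 hRgap, List.cons_append,
            pvFirstNonGap_cons_ne d _ _ hdne]
      have hlen1 : A1.length + (t'.length + 1) = s.length := by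
        have := congrArg List.length hsplit
        simpa using this
      have hlen2 : R.length + (v'.length + 1) = t'.length + 1 := by
        have := congrArg List.length hsplit2
        simpa using this
      have hAval : pvASeq s =
          List.replicate A1.length '?'
            ++ PySem.List.slice s (some ((A1.length : Nat) : Int))
                 (some (((s.length - (1 + R.length) + 1 : Nat)) : Int))
            ++ List.replicate (s.length - (s.length - (1 + R.length)) - 1) '?' := by
        unfold pvASeq
        rw [h1, h2]
      have hdrop : s.drop A1.length = (d :: v').reverse ++ R.reverse := by
        conv_lhs => rw [hsdecomp]
        exact List.drop_left
      have hslice :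
          PySem.List.slice s (some ((A1.length : Nat) : Int))
            (some (((s.length - (1 + R.length) + 1 : Nat)) : Int))
          = (d :: v').reverse := by
        rw [PySem.List.slice_natCast, hdrop]
        rw [List.take_append_of_le_length
          (by simp only [List.length_reverse, List.length_cons]; omega)]
        exact List.take_of_length_le
          (by simp only [List.length_reverse, List.length_cons]; omega)
      rw [hAval, hslice]
      unfold pvStrip pvRstrip
      simp only [hdw, hv]
      simp only [List.length_cons, List.length_reverse]
      have e1 : A1.length = s.length - (t'.length + 1) := by omega
      have e2 : s.length - (s.length - (1 + R.length)) - 1 = t'.length + 1 - (v'.length + 1) := by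
        omega
      rw [e1, e2]

-- a run of gaps only bumps the pending counter, whatever the state
theorem pvFold_gaps (xs : List Char) (h : ∀ c ∈ xs, c = '-') :
    ∀ (out : List Char) (run : Nat) (b : Bool),
      xs.foldl pvBStep (out, run, b) = (out, run + xs.length, b) := by
  induction xs with
  | nil => intro out run b; simp
  | cons c cs ih =>
      intro out run b
      have hc : c = '-' := h c (by simp)
      simp only [List.foldl_cons, pvBStep, hc]
      rw [if_pos (by decide : ((('-' : Char) == '-') = true))]
      rw [ih (fun d hd => h d (by simp [hd])) out (run + 1) b]
      have e : run + 1 + cs.length = run + ('-' :: cs).length := by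
        simp only [List.length_cons]; omega
      rw [e]

-- after the first residue (seen = true): internal gap runs flush as '-',
-- the trailing gap run stays pending
theorem pvFold_seen (m : List Char) :
    ∀ (out : List Char) (run : Nat),
      m.foldl pvBStep (out, run, true) =
        if m.all (· == '-') then (out, run + m.length, true)
        else (out ++ List.replicate run '-' ++ pvRstrip m,
              m.length - (pvRstrip m).length, true) := by
  induction m with
  | nil => intro out run; simp
  | cons c m' ih =>
      intro out run
      by_cases hc : c = '-'
      · subst hc
        simp only [List.foldl_cons, pvBStep]
        rw [if_pos (by decide : ((('-' : Char) == '-') = true))]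
        rw [ih out (run + 1)]
        by_cases hall : m'.all (· == '-')
        · have hall2 : (('-' :: m').all (· == '-')) = true := by
            simp [List.all_cons, hall]
          rw [if_pos hall, if_pos hall2]
          have e : run + 1 + m'.length = run + ('-' :: m').length := by
            simp only [List.length_cons]; omega
          rw [e]
        · have hall2 : ¬ (('-' :: m').all (· == '-')) = true := by
            simp [List.all_cons, hall]
          rw [if_neg hall, if_neg hall2]
          have hne : ¬ (m'.reverse.dropWhile (· == '-')).isEmpty = true := by
            simp only [List.isEmpty_iff, List.dropWhile_eq_nil_iff]
            intro hgap
            apply hall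
            rw [List.all_eq_true]
            intro x hx
            simpa using hgap x (List.mem_reverse.mpr hx)
          have hr : pvRstrip ('-' :: m') = '-' :: pvRstrip m' := by
            unfold pvRstrip
            rw [List.reverse_cons, List.dropWhile_append, if_neg hne, List.reverse_append]
            rfl
          rw [hr]
          have hrep : List.replicate (run + 1) '-' ++ pvRstrip m'
              = List.replicate run '-' ++ ('-' :: pvRstrip m') := by
            rw [List.replicate_succ']
            simp
          have hle : (pvRstrip m').length ≤ m'.length := by
            unfold pvRstrip
            calc (m'.reverse.dropWhile (· == '-')).reverse.length
                = (m'.reverse.dropWhile (· == '-')).length := by simp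
              _ ≤ m'.reverse.length := List.length_dropWhile_le _ _
              _ = m'.length := by simp
          have e : m'.length - (pvRstrip m').length
              = ('-' :: m').length - ('-' :: pvRstrip m').length := by
            simp only [List.length_cons]; omega
          rw [← e, List.append_assoc, hrep, ← List.append_assoc]
      · simp only [List.foldl_cons, pvBStep]
        rw [if_neg (by simpa using hc : ¬ ((c == '-') = true))]
        simp only [if_pos trivial]
        rw [ih (out ++ List.replicate run '-' ++ [c]) 0]
        have hallc : ¬ ((c :: m').all (· == '-')) = true := by
          simp [List.all_cons, hc]
        rw [if_neg hallc]
        by_cases hall : m'.all (· == '-')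
        · rw [if_pos hall]
          have hr : pvRstrip (c :: m') = [c] := by
            unfold pvRstrip
            rw [List.reverse_cons, List.dropWhile_append]
            have : (m'.reverse.dropWhile (· == '-')).isEmpty = true := by
              simp only [List.isEmpty_iff, List.dropWhile_eq_nil_iff]
              intro x hx
              have := (List.all_eq_true.mp hall) x (List.mem_reverse.mp hx)
              simpa using this
            rw [if_pos this]
            simp [hc]
          rw [hr]
          have e : 0 + m'.length = (c :: m').length - ([c] : List Char).length := by
            simp only [List.length_cons, List.length_nil]; omega
          rw [← e]
        · rw [if_neg hall]
          have hne : ¬ (m'.reverse.dropWhile (· == '-')).isEmpty = true := by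
            simp only [List.isEmpty_iff, List.dropWhile_eq_nil_iff]
            intro hgap
            apply hall
            rw [List.all_eq_true]
            intro x hx
            simpa using hgap x (List.mem_reverse.mpr hx)
          have hr : pvRstrip (c :: m') = c :: pvRstrip m' := by
            unfold pvRstrip
            rw [List.reverse_cons, List.dropWhile_append, if_neg hne, List.reverse_append]
            rfl
          rw [hr]
          have hlen : (pvRstrip m').length ≤ m'.length := by
            unfold pvRstrip
            calc (m'.reverse.dropWhile (· == '-')).reverse.length
                = (m'.reverse.dropWhile (· == '-')).length := by simp
              _ ≤ m'.reverse.length := List.length_dropWhile_le _ _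
              _ = m'.length := by simp
          have e : m'.length - (pvRstrip m').length
              = (c :: m').length - (c :: pvRstrip m').length := by
            simp only [List.length_cons]; omega
          rw [← e]
          simp

theorem pvB_eq_strip (s : List Char) : pvBSeq s = pvStrip s := by
  have hsplit : s.takeWhile (fun c => c == '-') ++ s.dropWhile (fun c => c == '-') = s :=
    List.takeWhile_append_dropWhile
  have hA1gap : ∀ c ∈ s.takeWhile (fun c => c == '-'), c = '-' := by
    intro c hc
    simpa using List.mem_takeWhile_imp hc
  rcases hdw : s.dropWhile (fun c => c == '-') with _ | ⟨c, t'⟩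
  · -- all-gap (or empty) sequence
    rw [hdw] at hsplit
    have hallgap : ∀ c ∈ s, c = '-' := by
      intro c hc
      rw [← hsplit] at hc
      simpa using hA1gap c (by simpa using hc)
    have hf : s.foldl pvBStep ([], 0, false) = ([], 0 + s.length, false) :=
      pvFold_gaps s hallgap [] 0 false
    simp only [pvBSeq, hf]
    simp [pvStrip, pvRstrip, hdw]
  · rw [hdw] at hsplit
    have hcne : c ≠ '-' := by
      have := List.head?_dropWhile_not (fun c => c == '-') s
      rw [hdw] at this
      simpa using this
    set A1 := s.takeWhile (fun c => c == '-') with hA1def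
    have hlen1 : A1.length + (t'.length + 1) = s.length := by
      have := congrArg List.length hsplit
      simpa using this
    have hf1 : s.foldl pvBStep ([], 0, false)
        = (c :: t').foldl pvBStep ([], A1.length, false) := by
      conv_lhs => rw [← hsplit]
      rw [List.foldl_append, pvFold_gaps A1 hA1gap [] 0 false]
      simp
    have hf2 : (c :: t').foldl pvBStep ([], A1.length, false)
        = t'.foldl pvBStep (List.replicate A1.length '?' ++ [c], 0, true) := by
      simp only [List.foldl_cons, pvBStep]
      rw [if_neg (by simpa using hcne : ¬ ((c == '-') = true))]
      simp
    have hrlen : (pvRstrip t').length ≤ t'.length := by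
      unfold pvRstrip
      calc (t'.reverse.dropWhile (· == '-')).reverse.length
          = (t'.reverse.dropWhile (· == '-')).length := by simp
        _ ≤ t'.reverse.length := List.length_dropWhile_le _ _
        _ = t'.length := by simp
    by_cases hall : t'.all (· == '-')
    · -- only trailing gaps after the first residue
      have hr : pvRstrip (c :: t') = [c] := by
        unfold pvRstrip
        rw [List.reverse_cons, List.dropWhile_append]
        have : (t'.reverse.dropWhile (· == '-')).isEmpty = true := by
          simp only [List.isEmpty_iff, List.dropWhile_eq_nil_iff]
          intro x hx
          have := (List.all_eq_true.mp hall) x (List.mem_reverse.mp hx)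
          simpa using this
        rw [if_pos this]
        simp [hcne]
      simp only [pvBSeq, hf1, hf2, pvFold_seen t' _ 0, if_pos hall]
      simp only [pvStrip, hdw, hr]
      have e1 : s.length - (c :: t').length = A1.length := by
        simp only [List.length_cons]; omega
      have e2 : (c :: t').length - ([c] : List Char).length = 0 + t'.length := by
        simp only [List.length_cons, List.length_nil]; omega
      rw [e1, e2]
    · have hr : pvRstrip (c :: t') = c :: pvRstrip t' := by
        unfold pvRstrip
        rw [List.reverse_cons, List.dropWhile_append]
        have hne : ¬ (t'.reverse.dropWhile (· == '-')).isEmpty = true := by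
          simp only [List.isEmpty_iff, List.dropWhile_eq_nil_iff]
          intro hgap
          apply hall
          rw [List.all_eq_true]
          intro x hx
          simpa using hgap x (List.mem_reverse.mpr hx)
        rw [if_neg hne, List.reverse_append]
        rfl
      simp only [pvBSeq, hf1, hf2, pvFold_seen t' _ 0, if_neg hall]
      simp only [pvStrip, hdw, hr]
      have e1 : s.length - (c :: t').length = A1.length := by
        simp only [List.length_cons]; omega
      have e2 : (c :: t').length - (c :: pvRstrip t').length
          = t'.length - (pvRstrip t').length := by
        simp only [List.length_cons]; omega
      rw [e1, e2]
      simp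

theorem replace_terminal_gaps_dict_spec_aux :
    ∀ alignment, replace_terminal_gaps_dict alignment = replace_terminal_gaps_dict_alt alignment := by
  intro alignment
  unfold replace_terminal_gaps_dict replace_terminal_gaps_dict_alt
  apply List.map_congr_left
  intro p _
  rw [pvA_eq_strip, pvB_eq_strip]

-- ===== VERDICT (by name: the statement is the Claim_ definition above) =====
theorem replace_terminal_gaps_dict_spec : Claim_equal_replace_terminal_gaps_dict := by
  intro alignment _
  exact (replace_terminal_gaps_dict_spec_aux alignment).symm ▸ rfl
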